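-- pv_equiv track=rewrite | github.com/tombichot/advent-of-code-2024 | day04/main.py | findNextLetter
-- ===== SOURCE A (Python) =====
-- def findNextLetter(word, lines, letterIndex, position, direction):
--     i = position[0] + direction[0]
--     j = position[1] + direction[1]
--
--     if (0 <= i < len(lines)) and (0 <= j < len(lines[i])):
--         if lines[i][j] == word[letterIndex]:
--             letterIndex += 1
--             if letterIndex == len(word):
--                 return True
--             else:
--                 return findNextLetter(word, lines, letterIndex, [i, j], direction)
--         else:
--             return False
--     else:
--         return False
-- ===== SOURCE B (Python) =====
-- def findNextLetter(word, lines, letterIndex, position, direction):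
--     # iterative walk instead of recursion; does not mutate position
--     i, j = position[0], position[1]
--     di, dj = direction[0], direction[1]
--     while True:
--         i += di
--         j += dj
--         if not (0 <= i < len(lines)):
--             return False
--         if not (0 <= j < len(lines[i])):
--             return False
--         if lines[i][j] != word[letterIndex]:
--             return False
--         letterIndex += 1
--         if letterIndex == len(word):
--             return True
-- ===== Notes on version B (the rewrite author's own statement) =====
-- stated objective: simpler
-- what changed: Replaces A's self-recursion (which rebuilds a fresh [i, j] position list on every step) with a flat while-loop over three integer cursors with guard-clause early returns.
import Mathlib
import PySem

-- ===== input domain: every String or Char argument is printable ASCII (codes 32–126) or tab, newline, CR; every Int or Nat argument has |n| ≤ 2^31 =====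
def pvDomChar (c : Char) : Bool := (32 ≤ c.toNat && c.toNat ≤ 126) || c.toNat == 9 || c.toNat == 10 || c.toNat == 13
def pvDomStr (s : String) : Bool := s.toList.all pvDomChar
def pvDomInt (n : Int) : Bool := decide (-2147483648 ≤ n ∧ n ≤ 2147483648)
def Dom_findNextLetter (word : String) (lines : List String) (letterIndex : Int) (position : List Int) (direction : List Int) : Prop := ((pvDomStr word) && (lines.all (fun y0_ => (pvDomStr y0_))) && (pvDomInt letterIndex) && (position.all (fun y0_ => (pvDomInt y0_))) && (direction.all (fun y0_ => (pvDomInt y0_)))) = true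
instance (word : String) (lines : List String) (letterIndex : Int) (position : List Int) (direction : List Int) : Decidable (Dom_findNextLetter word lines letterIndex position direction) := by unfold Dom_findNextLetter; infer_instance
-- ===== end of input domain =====

-- B replaces A's self-recursion (which allocates a fresh [i, j] list each step) by a flat
-- while-loop over three integer cursors with guard-clause early returns; same return value.

-- ===== PORT A =====
-- literal port of A: recursion carrying the position as a list, rebuilt as [i, j] each call
def findNextLetter (word : String) (lines : List String) (letterIndex : Int) (position : List Int) (direction : List Int) : Bool :=
  match PySem.List.pyGet? position 0, PySem.List.pyGet? direction 0,
        PySem.List.pyGet? position 1, PySem.List.pyGet? direction 1 with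
  | some p0, some d0, some p1, some d1 =>
    let i := p0 + d0
    let j := p1 + d1
    if 0 ≤ i ∧ i < (lines.length : Int) then
      match PySem.List.pyGet? lines i with
      | some line =>
        if 0 ≤ j ∧ j < (PySem.Str.len line : Int) then
          match PySem.Str.pyGet? line j, hw : PySem.Str.pyGet? word letterIndex with
          | some c, some w =>
            if c = w then
              if letterIndex + 1 = (PySem.Str.len word : Int) then true
              else findNextLetter word lines (letterIndex + 1) [i, j] direction
            else false
          | _, _ => false  -- Python raises IndexError on word[letterIndex]; outside Pre_
        else false
      | none => false
    else false
  | _, _, _, _ => false  -- Python raises IndexError on position/direction; outside Pre_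
termination_by ((PySem.Str.len word : Int) + 1 - letterIndex).toNat
decreasing_by
  simp only [PySem.Str.pyGet?, PySem.Chars.pyGet?] at hw
  have h := PySem.List.pyGet?_eq_none_iff (xs := word.toList) (i := letterIndex)
  rw [hw] at h
  simp [PySem.Raise.InRange, PySem.Str.len] at h ⊢
  omega

-- ===== PORT B =====
-- B's while-loop: integer cursors i, j and the running letter index k
def fnlLoop (word : String) (lines : List String) (d0 d1 : Int) (i j k : Int) : Bool :=
  let i' := i + d0
  let j' := j + d1
  if ¬ (0 ≤ i' ∧ i' < (lines.length : Int)) then false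
  else
    match PySem.List.pyGet? lines i' with
    | none => false
    | some line =>
      if ¬ (0 ≤ j' ∧ j' < (PySem.Str.len line : Int)) then false
      else
        match PySem.Str.pyGet? line j' with
        | none => false
        | some c =>
          match hw : PySem.Str.pyGet? word k with
          | none => false  -- Python raises IndexError on word[letterIndex]; outside Pre_
          | some w =>
            if c ≠ w then false
            else if k + 1 = (PySem.Str.len word : Int) then true
            else fnlLoop word lines d0 d1 i' j' (k + 1)
termination_by ((PySem.Str.len word : Int) + 1 - k).toNat
decreasing_by
  simp only [PySem.Str.pyGet?, PySem.Chars.pyGet?] at hw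
  have h := PySem.List.pyGet?_eq_none_iff (xs := word.toList) (i := k)
  rw [hw] at h
  simp [PySem.Raise.InRange, PySem.Str.len] at h ⊢
  omega

def findNextLetter_alt (word : String) (lines : List String) (letterIndex : Int) (position : List Int) (direction : List Int) : Bool :=
  -- Python raises IndexError on short position/direction; those inputs are outside Pre_
  match PySem.List.pyGet? position 0 with
  | none => false
  | some i =>
    match PySem.List.pyGet? position 1 with
    | none => false
    | some j =>
      match PySem.List.pyGet? direction 0 with
      | none => false
      | some d0 =>
        match PySem.List.pyGet? direction 1 with
        | none => false
        | some d1 => fnlLoop word lines d0 d1 i j letterIndex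

-- ===== PRECONDITION & SPEC =====
-- Pre_ = exactly the inputs where Python A returns: position/direction have ≥ 2 entries and
-- either letterIndex is a valid (possibly negative) Python index into word, or the first step
-- leaves the grid (then A returns False before ever indexing word).
def Pre_findNextLetter (word : String) (lines : List String) (letterIndex : Int) (position : List Int) (direction : List Int) : Prop :=
  2 ≤ position.length ∧ 2 ≤ direction.length ∧
  ((-(PySem.Str.len word : Int) ≤ letterIndex ∧ letterIndex < (PySem.Str.len word : Int)) ∨
   ¬ (0 ≤ position.getD 0 0 + direction.getD 0 0 ∧
      position.getD 0 0 + direction.getD 0 0 < (lines.length : Int) ∧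
      0 ≤ position.getD 1 0 + direction.getD 1 0 ∧
      position.getD 1 0 + direction.getD 1 0 <
        (PySem.Str.len ((PySem.List.pyGet? lines (position.getD 0 0 + direction.getD 0 0)).getD "") : Int)))
instance (word : String) (lines : List String) (letterIndex : Int) (position : List Int) (direction : List Int) : Decidable (Pre_findNextLetter word lines letterIndex position direction) := by unfold Pre_findNextLetter; infer_instance

def pvWitness_findNextLetter : String × List String × Int × List Int × List Int :=
  ("XMAS", ["XMAS", "ABCD"], 1, [0, 0], [0, 1])

def Spec_findNextLetter (word : String) (lines : List String) (letterIndex : Int) (position : List Int) (direction : List Int) (out : Bool) : Prop := out = findNextLetter_alt word lines letterIndex position direction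
instance (word : String) (lines : List String) (letterIndex : Int) (position : List Int) (direction : List Int) (out : Bool) : Decidable (Spec_findNextLetter word lines letterIndex position direction out) := by unfold Spec_findNextLetter; infer_instance

-- ===== CLAIM (what is proved, stated in full; the proofs are below) =====
def Claim_equal_findNextLetter : Prop := ∀ (word : String) (lines : List String) (letterIndex : Int) (position : List Int) (direction : List Int), Dom_findNextLetter word lines letterIndex position direction → Pre_findNextLetter word lines letterIndex position direction → Spec_findNextLetter word lines letterIndex position direction (findNextLetter word lines letterIndex position direction)

-- ===== LEMMAS AND PROOFS =====

-- A's recursion consults position/direction only through indices 0 and 1, so it equals B's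
-- loop started from those components; n is fuel bounding the remaining letters.
lemma fnl_eq_loop (word : String) (lines : List String) (direction : List Int) (d0 d1 : Int)
    (hd0 : PySem.List.pyGet? direction 0 = some d0)
    (hd1 : PySem.List.pyGet? direction 1 = some d1) :
    ∀ (n : Nat) (k i j : Int) (position : List Int),
      PySem.List.pyGet? position 0 = some i →
      PySem.List.pyGet? position 1 = some j →
      (((PySem.Str.len word : Int) + 1 - k).toNat ≤ n) →
      findNextLetter word lines k position direction = fnlLoop word lines d0 d1 i j k := by
  intro n
  induction n with
  | zero =>
    intro k i j position hp0 hp1 hn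
    have hnone : PySem.Str.pyGet? word k = none := by
      simp only [PySem.Str.pyGet?, PySem.Chars.pyGet?]
      rw [PySem.List.pyGet?_eq_none_iff]
      simp [PySem.Raise.InRange, PySem.Str.len] at hn ⊢
      omega
    rw [findNextLetter, fnlLoop, hp0, hp1, hd0, hd1]
    by_cases hb1 : 0 ≤ i + d0 ∧ i + d0 < (lines.length : Int)
    · simp only [if_pos hb1, if_neg (not_not_intro hb1)]
      cases hli : PySem.List.pyGet? lines (i + d0) with
      | none => rfl
      | some line =>
        by_cases hb2 : 0 ≤ j + d1 ∧ j + d1 < (PySem.Str.len line : Int)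
        · simp only [if_pos hb2, if_neg (not_not_intro hb2)]
          cases hwk : PySem.Str.pyGet? word k with
          | none => cases hcj : PySem.Str.pyGet? line (j + d1) <;> rfl
          | some w => rw [hnone] at hwk; cases hwk
        · simp only [if_neg hb2, if_pos hb2]
    · simp only [if_neg hb1, if_pos hb1]
  | succ n ih =>
    intro k i j position hp0 hp1 hn
    rw [findNextLetter, fnlLoop, hp0, hp1, hd0, hd1]
    by_cases hb1 : 0 ≤ i + d0 ∧ i + d0 < (lines.length : Int)
    · simp only [if_pos hb1, if_neg (not_not_intro hb1)]
      cases hli : PySem.List.pyGet? lines (i + d0) with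
      | none => rfl
      | some line =>
        by_cases hb2 : 0 ≤ j + d1 ∧ j + d1 < (PySem.Str.len line : Int)
        · simp only [if_pos hb2, if_neg (not_not_intro hb2)]
          cases hcj : PySem.Str.pyGet? line (j + d1) with
          | none => cases hwk : PySem.Str.pyGet? word k <;> rfl
          | some c =>
            cases hwk : PySem.Str.pyGet? word k with
            | none => rfl
            | some w =>
              have hk : k < (word.length : Int) := by
                have hwk' := hwk
                simp only [PySem.Str.pyGet?, PySem.Chars.pyGet?] at hwk'
                have h := PySem.List.pyGet?_eq_none_iff (xs := word.toList) (i := k)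
                rw [hwk'] at h
                simp [PySem.Raise.InRange] at h
                omega
              by_cases hcw : c = w
              · by_cases hlen : k + 1 = (PySem.Str.len word : Int)
                · simp only [if_pos hcw, if_pos hlen, if_neg (not_not_intro hcw)]
                · have hrec := ih (k+1) (i+d0) (j+d1) [i+d0, j+d1] (by simp [pysem]) (by simp [pysem])
                    (by simp [PySem.Str.len] at hn ⊢; omega)
                  simp only [if_pos hcw, if_neg hlen, if_neg (not_not_intro hcw)]
                  exact hrec
              · simp only [if_neg hcw, if_pos hcw]
        · simp only [if_neg hb2, if_pos hb2]
    · simp only [if_neg hb1, if_pos hb1]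

-- ===== VERDICT (by name: the statement is the Claim_ definition above) =====
theorem findNextLetter_spec : Claim_equal_findNextLetter := by
  intro word lines k position direction hdom hpre
  unfold Spec_findNextLetter
  obtain ⟨hp, hd, -⟩ := hpre
  rcases position with _ | ⟨a, _ | ⟨b, t⟩⟩ <;> simp at hp
  rcases direction with _ | ⟨c, _ | ⟨d, u⟩⟩ <;> simp at hd
  have hp0 : PySem.List.pyGet? (a :: b :: t) 0 = some a := by simp [pysem]
  have hp1 : PySem.List.pyGet? (a :: b :: t) 1 = some b := by simp [pysem]
  have hd0 : PySem.List.pyGet? (c :: d :: u) 0 = some c := by simp [pysem]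
  have hd1 : PySem.List.pyGet? (c :: d :: u) 1 = some d := by simp [pysem]
  rw [findNextLetter_alt]
  simp only [hp0, hp1, hd0, hd1]
  exact fnl_eq_loop word lines _ c d hd0 hd1 _ k a b _ hp0 hp1 le_rfl
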